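-- pv_equiv track=rewrite | github.com/golfyangkee/daily_quiz | 프로그래머스/0/120843. 공 던지기/공 던지기.py | solution
-- ===== SOURCE A (Python) =====
-- def solution(numbers, k):
--     num = len(numbers)//2
--     test =[]
--     if num <k:
--         for i in range(0,k-num):
--             test.extend(numbers)
--     else:
--           test = numbers
--     answer = test[::2]
--     return answer[k-1]
-- ===== SOURCE B (Python) =====
-- def solution(numbers, k):
--     # The ball visits indices 0, 2, 4, ... modulo len(numbers); the k-th throw is a direct modular index.
--     return numbers[2 * (k - 1) % len(numbers)]
-- ===== Notes on version B (the rewrite author's own statement) =====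
-- stated objective: simpler
-- what changed: B replaces A's building of a (k - len//2)-fold concatenation of the list followed by a stride-2 slice with a single modular index numbers[2*(k-1) % len(numbers)].
-- outside the precondition, e.g. on solution([1, 2, 3], 0): A returns 3, B returns 2
-- crash fix: For k >= 1 with too few repeats (e.g. len 2, k >= 2, or len 1, k >= 2) and for very negative k, A raises IndexError where B returns the modular element; Raises_solution states this region and B's value at ([1,2],2) is 1. — e.g. on solution([1, 2], 2): A raises IndexError, B returns 1
import Mathlib
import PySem

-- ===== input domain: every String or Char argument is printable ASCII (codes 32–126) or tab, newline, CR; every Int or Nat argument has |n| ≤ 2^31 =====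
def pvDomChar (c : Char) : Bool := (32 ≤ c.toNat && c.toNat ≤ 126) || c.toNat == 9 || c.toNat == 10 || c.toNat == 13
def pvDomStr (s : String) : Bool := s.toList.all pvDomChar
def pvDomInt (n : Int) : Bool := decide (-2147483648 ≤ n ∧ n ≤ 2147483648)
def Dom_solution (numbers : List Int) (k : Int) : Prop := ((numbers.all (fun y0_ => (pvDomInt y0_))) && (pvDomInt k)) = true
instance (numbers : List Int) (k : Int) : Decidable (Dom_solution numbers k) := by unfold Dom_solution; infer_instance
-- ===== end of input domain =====

-- B replaces A's repeat-and-slice construction by a single modular index (simpler: one line, no intermediate lists).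

-- ===== PORT A =====
def solution (numbers : List Int) (k : Int) : Int :=
  let num : Int := PySem.Int.floordiv (numbers.length : Int) 2
  let test : List Int :=
    if num < k then
      (PySem.List.pyRange 0 (k - num) 1).foldl (fun t _ => t ++ numbers) []
    else
      numbers
  let answer : List Int := (PySem.List.slice? test none none 2).getD []
  PySem.List.pyGetD answer (k - 1) 0

-- ===== PORT B =====
def solution_alt (numbers : List Int) (k : Int) : Int :=
  PySem.List.pyGetD numbers (PySem.Int.mod (2 * (k - 1)) (numbers.length : Int)) 0

-- ===== PRECONDITION & SPEC =====
-- Pre_ restricts to the quiz's natural domain k ≥ 1 on a nonempty list (for k ≤ 0 A reads a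
-- negative index and wraps around, outside the task's domain — see cites), and excludes the
-- inputs where A raises IndexError because its (k - len//2)-fold repetition is too short.
def Pre_solution (numbers : List Int) (k : Int) : Prop :=
  numbers ≠ [] ∧ 1 ≤ k ∧
  (PySem.Int.floordiv (numbers.length : Int) 2 < k →
    2 * (k - 1) < (numbers.length : Int) * (k - PySem.Int.floordiv (numbers.length : Int) 2))
instance (numbers : List Int) (k : Int) : Decidable (Pre_solution numbers k) := by
  unfold Pre_solution; infer_instance

def pvWitness_solution : List Int × Int := ([1, 2, 3, 4, 5], 3)

-- On a nonempty list A raises IndexError (and B returns the modular element) exactly when k ≥ 1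
-- but the (k - len//2)-fold repetition of the list is too short for index k-1 of the stride-2
-- slice, or when k is so negative that index k-1 falls before the start of that slice.
def Raises_solution (numbers : List Int) (k : Int) : Prop :=
  numbers ≠ [] ∧
  ((1 ≤ k ∧ PySem.Int.floordiv (numbers.length : Int) 2 < k ∧
      (numbers.length : Int) * (k - PySem.Int.floordiv (numbers.length : Int) 2) ≤ 2 * (k - 1)) ∨
   (k < 1 ∧ k - 1 < -(PySem.Int.floordiv ((numbers.length : Int) + 1) 2)))
instance (numbers : List Int) (k : Int) : Decidable (Raises_solution numbers k) := by
  unfold Raises_solution; infer_instance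
def pvRaiseWitness_solution : List Int × Int := ([1, 2], 2)
def pvRaiseWitnessOut_solution : Int := 1

def Spec_solution (numbers : List Int) (k : Int) (out : Int) : Prop := out = solution_alt numbers k
instance (numbers : List Int) (k : Int) (out : Int) : Decidable (Spec_solution numbers k out) := by
  unfold Spec_solution; infer_instance

-- ===== CLAIM (what is proved, stated in full; the proofs are below) =====
def Claim_equal_solution : Prop := ∀ (numbers : List Int) (k : Int), Dom_solution numbers k → Pre_solution numbers k → Spec_solution numbers k (solution numbers k)
def Claim_raises_solution : Prop := (∀ (numbers : List Int) (k : Int), Dom_solution numbers k → Raises_solution numbers k → ¬ Pre_solution numbers k) ∧ (Dom_solution (pvRaiseWitness_solution.1) (pvRaiseWitness_solution.2) ∧ Raises_solution (pvRaiseWitness_solution.1) (pvRaiseWitness_solution.2) ∧ solution_alt (pvRaiseWitness_solution.1) (pvRaiseWitness_solution.2) = pvRaiseWitnessOut_solution)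

-- ===== LEMMAS AND PROOFS =====

-- A stride-2 slice built by slice? reads indices 0,2,4,…, all in range here.
theorem filterMap_even (xs : List Int) (c : Nat) (h : ∀ j < c, 2 * j < xs.length) :
    List.filterMap (fun (j : Nat) => xs[(2 * (j : Int)).toNat]?) (List.range c) =
      List.map (fun j => xs[2 * j]?.getD 0) (List.range c) := by
  induction c with
  | zero => simp
  | succ c ih =>
    rw [List.range_succ, List.filterMap_append, List.map_append,
      ih (fun j hj => h j (by omega))]
    have h2 : (2 * (c : Int)).toNat = 2 * c := by omega
    simp [h2, List.getElem?_eq_getElem (h c (by omega))]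

-- Characterises port A's 'test[::2]' as the list of elements at even indices.
theorem slice2_eq_map (xs : List Int) :
    (PySem.List.slice? xs none none 2).getD [] =
      (List.range ((xs.length + 1) / 2)).map (fun j => xs.getD (2 * j) 0) := by
  simp only [PySem.List.slice?, PySem.List.sliceIndices]
  norm_num
  have hc : (if 0 < xs.length then (((xs.length : Int) + 2 - 1) / 2).toNat else 0)
      = (xs.length + 1) / 2 := by
    split_ifs with h <;> omega
  rw [hc]
  exact filterMap_even xs _ (fun j hj => by omega)

theorem flatMap_const_eq_flatten_replicate (l : List Int) (xs : List Int) :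
    l.flatMap (fun _ => xs) = (List.replicate l.length xs).flatten := by
  induction l with
  | nil => simp
  | cons a l ih => simp [List.replicate_succ, ih]

-- Indexing into t concatenated copies of xs is indexing xs modulo its length.
theorem replicate_flatten_getElem? (xs : List Int) (t i : Nat) (hi : i < t * xs.length) :
    ((List.replicate t xs).flatten)[i]? = xs[i % xs.length]? := by
  induction t generalizing i with
  | zero => simp at hi
  | succ t ih =>
    rw [Nat.succ_mul] at hi
    have hn : 0 < xs.length := by
      rcases Nat.eq_zero_or_pos xs.length with h | h
      · rw [h] at hi; simp at hi
      · exact h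
    rw [List.replicate_succ, List.flatten_cons]
    by_cases h : i < xs.length
    · rw [List.getElem?_append_left h, Nat.mod_eq_of_lt h]
    · rw [Nat.not_lt] at h
      rw [List.getElem?_append_right h, ih (i - xs.length) (by omega),
        Nat.mod_eq_sub_mod h]

theorem solution_eq_alt (numbers : List Int) (k : Int) (hne : numbers ≠ []) (hk : 1 ≤ k)
    (hcond : PySem.Int.floordiv (numbers.length : Int) 2 < k →
      2 * (k - 1) < (numbers.length : Int) * (k - PySem.Int.floordiv (numbers.length : Int) 2)) :
    solution numbers k = solution_alt numbers k := by
  have hn : 0 < numbers.length := List.length_pos_iff.mpr hne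
  have hfd : PySem.Int.floordiv (numbers.length : Int) 2 = ((numbers.length / 2 : Nat) : Int) := by
    exact_mod_cast PySem.Int.floordiv_natCast numbers.length 2
  unfold solution solution_alt
  dsimp only
  rw [hfd] at hcond ⊢
  set n := numbers.length with hnn
  set j := (k - 1).toNat with hj
  have hjk : (j : Int) = k - 1 := by omega
  have hmod : PySem.Int.mod (2 * (k - 1)) (n : Int) = (((2 * j) % n : Nat) : Int) := by
    rw [PySem.Int.mod_eq_emod_of_pos (by exact_mod_cast hn), ← hjk]
    push_cast
    ring_nf
  rw [hmod, PySem.List.pyGetD_natCast]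
  by_cases hb : ((n / 2 : Nat) : Int) < k
  · rw [if_pos hb]
    set r := (k - ((n / 2 : Nat) : Int)).toNat with hrdef
    have hr : (r : Int) = k - ((n / 2 : Nat) : Int) := by omega
    have hlen : (PySem.List.pyRange 0 (k - ((n / 2 : Nat) : Int)) 1).length = r := by
      rw [PySem.List.length_pyRange_one]; omega
    rw [PySem.List.foldl_append_eq_flatMap, List.nil_append,
      flatMap_const_eq_flatten_replicate, hlen]
    have htlen : (List.replicate r numbers).flatten.length = r * n := by
      simp [List.length_flatten, ← hnn]
    have h2j : 2 * j < r * n := by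
      have h1 := hcond hb
      have h2 : ((2 * j : Nat) : Int) < ((r * n : Nat) : Int) := by
        push_cast
        rw [hjk, hr]
        linarith [h1, mul_comm ((n : Nat) : Int) (k - ((n / 2 : Nat) : Int))]
      exact_mod_cast h2
    have hjlt : j < ((List.replicate r numbers).flatten.length + 1) / 2 := by
      rw [htlen]
      revert h2j
      generalize r * n = L
      omega
    rw [slice2_eq_map, ← hjk, PySem.List.pyGetD_natCast, List.getD_eq_getElem?_getD,
      List.getElem?_map, List.getElem?_range hjlt]
    simp only [Option.map_some, Option.getD_some]
    rw [List.getD_eq_getElem?_getD, List.getD_eq_getElem?_getD,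
      replicate_flatten_getElem? numbers r (2 * j) h2j]
  · rw [if_neg hb]
    have h2j : 2 * j < n := by omega
    rw [slice2_eq_map, ← hjk, PySem.List.pyGetD_natCast, List.getD_eq_getElem?_getD,
      List.getElem?_map, List.getElem?_range (by omega : j < (n + 1) / 2)]
    simp only [Option.map_some, Option.getD_some]
    rw [Nat.mod_eq_of_lt h2j]

-- ===== VERDICT (by name: the statement is the Claim_ definition above) =====
theorem solution_spec : Claim_equal_solution := by
  intro numbers k _ hpre
  unfold Pre_solution at hpre
  unfold Spec_solution
  exact solution_eq_alt numbers k hpre.1 hpre.2.1 hpre.2.2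

@[simp] theorem solution_raises : Claim_raises_solution := by
  unfold Claim_raises_solution
  constructor
  · intro numbers k _ hr hpre
    obtain ⟨hne, hcase⟩ := hr
    unfold Pre_solution at hpre
    obtain ⟨_, hk, hcond⟩ := hpre
    rcases hcase with ⟨h1, h2, h3⟩ | ⟨h1, _⟩
    · have := hcond h2
      linarith
    · omega
  · decide
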